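-- pv_equiv track=rewrite | github.com/Bryan-LohJW/2026-recruitment-technical-assessment | backend/py_template/devdonalds.py | parse_handwriting
-- ===== SOURCE A (Python) =====
-- from typing import List, Dict, Union
--
-- def parse_handwriting(recipeName: str) -> Union[str | None]:
-- 	words = []
-- 	current_word = []
-- 	is_new_word = True
-- 	for char in recipeName:
-- 		if char.isalpha():
-- 			if is_new_word:
-- 				current_word.append(char.upper())
-- 				is_new_word = False
-- 			else:
-- 				current_word.append(char.lower())
-- 		elif char in [' ', '-', '_']:
-- 			if not is_new_word:
-- 				words.append(''.join(current_word))
-- 				current_word = []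
-- 				is_new_word = True
-- 		else:
-- 			pass
--
-- 	if len(current_word) != 0:
-- 		words.append(''.join(current_word))
--
-- 	result = ' '.join(words)
-- 	if len(result) == 0:
-- 		return None
--
-- 	return result
-- ===== SOURCE B (Python) =====
-- def parse_handwriting(recipeName):
-- 	# filter -> translate separators to spaces -> split -> capitalize -> join pipeline
-- 	cleaned = ''.join(
-- 		(' ' if c in ' -_' else c)
-- 		for c in recipeName
-- 		if c.isalpha() or c in ' -_'
-- 	)
-- 	result = ' '.join(w[:1].upper() + w[1:].lower() for w in cleaned.split())
-- 	return result if result else None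
-- ===== Notes on version B (the rewrite author's own statement) =====
-- stated objective: simpler
-- what changed: Replaced A's single stateful character loop (words/current_word/is_new_word state machine) with a stateless filter -> translate-separators-to-space -> str.split -> capitalize-each-word -> join pipeline.
import Mathlib
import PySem

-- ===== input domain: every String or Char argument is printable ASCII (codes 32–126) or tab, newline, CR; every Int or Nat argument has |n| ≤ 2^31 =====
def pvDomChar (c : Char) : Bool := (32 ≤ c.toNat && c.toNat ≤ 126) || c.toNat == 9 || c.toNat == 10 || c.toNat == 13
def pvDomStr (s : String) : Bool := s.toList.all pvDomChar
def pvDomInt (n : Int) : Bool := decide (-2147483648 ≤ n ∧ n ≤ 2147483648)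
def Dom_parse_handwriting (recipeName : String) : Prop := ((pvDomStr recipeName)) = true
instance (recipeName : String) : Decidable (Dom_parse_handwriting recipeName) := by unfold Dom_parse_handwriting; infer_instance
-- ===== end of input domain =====

-- B replaces A's stateful character loop with a filter/split/capitalize/join pipeline (objective: simpler).

-- ===== PORT A =====
-- the body of A's for-loop, over state (words, current_word, is_new_word)
def pvStepA (st : List String × List Char × Bool) (char : Char) : List String × List Char × Bool :=
  if PySem.Chars.isalpha char then
    if st.2.2 then (st.1, st.2.1 ++ [PySem.Chars.upperChar char], false)
    else (st.1, st.2.1 ++ [PySem.Chars.lowerChar char], st.2.2)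
  else if char == ' ' || char == '-' || char == '_' then
    if !st.2.2 then (st.1 ++ [String.ofList st.2.1], ([] : List Char), true) else st
  else st

def parse_handwriting (recipeName : String) : Option String :=
  let st := recipeName.toList.foldl pvStepA ([], [], true)
  let words := if st.2.1.length ≠ 0 then st.1 ++ [String.ofList st.2.1] else st.1
  let result := PySem.Str.join " " words
  if PySem.Str.len result = 0 then none else some result

-- ===== PORT B =====
-- w[:1].upper() + w[1:].lower()
def pvCapB (w : String) : String :=
  PySem.Str.upper (PySem.Str.slice w none (some 1)) ++ PySem.Str.lower (PySem.Str.slice w (some 1) none)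

def parse_handwriting_alt (recipeName : String) : Option String :=
  let cleaned : String := String.ofList
    ((recipeName.toList.filter
        (fun c => PySem.Chars.isalpha c || c == ' ' || c == '-' || c == '_')).map
      (fun c => if c == ' ' || c == '-' || c == '_' then ' ' else c))
  let result := PySem.Str.join " " ((PySem.Str.split₀ cleaned).map pvCapB)
  if result = "" then none else some result

-- ===== PRECONDITION & SPEC =====
def Spec_parse_handwriting (recipeName : String) (out : Option String) : Prop := out = parse_handwriting_alt recipeName
instance (recipeName : String) (out : Option String) : Decidable (Spec_parse_handwriting recipeName out) := by unfold Spec_parse_handwriting; infer_instance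

-- ===== CLAIM (what is proved, stated in full; the proofs are below) =====
def Claim_equal_parse_handwriting : Prop := ∀ (recipeName : String), Dom_parse_handwriting recipeName → Spec_parse_handwriting recipeName (parse_handwriting recipeName)

-- ===== LEMMAS AND PROOFS =====

-- the raw (uncapitalized) words of the input, with pending word `cur`
def pvV : List Char → List Char → List (List Char)
  | [], cur => if cur = [] then [] else [cur]
  | c :: t, cur =>
    if PySem.Chars.isalpha c then pvV t (cur ++ [c])
    else if c == ' ' || c == '-' || c == '_' then
      (if cur = [] then pvV t [] else cur :: pvV t [])
    else pvV t cur

-- capitalize a raw word the way A builds it char by char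
def pvCap : List Char → List Char
  | [] => []
  | h :: t => PySem.Chars.upperChar h :: t.map PySem.Chars.lowerChar

theorem pvAlpha_not_sep {c : Char} (h : PySem.Chars.isalpha c = true) :
    (c == ' ' || c == '-' || c == '_') = false := by
  simp only [PySem.Chars.isalpha, PySem.Chars.isupper, PySem.Chars.islower,
    Bool.or_eq_true, Bool.and_eq_true, decide_eq_true_eq, Char.le_def] at h
  simp only [Bool.or_eq_false_iff, beq_eq_false_iff_ne, ne_eq]
  refine ⟨⟨?_, ?_⟩, ?_⟩ <;> rintro rfl <;> revert h <;> decide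

theorem pvAlpha_not_space {c : Char} (h : PySem.Chars.isalpha c = true) :
    PySem.Chars.isspace c = false := by
  have h' : (65 ≤ c.toNat ∧ c.toNat ≤ 90) ∨ (97 ≤ c.toNat ∧ c.toNat ≤ 122) := by
    simp only [PySem.Chars.isalpha, PySem.Chars.isupper, PySem.Chars.islower, Bool.or_eq_true,
      Bool.and_eq_true, decide_eq_true_eq, Char.le_def, UInt32.le_iff_toNat_le] at h
    exact h
  simp only [PySem.Chars.isspace]
  simp
  omega

theorem pvCap_append_last (h : Char) (t : List Char) (c : Char) :
    pvCap ((h :: t) ++ [c]) = pvCap (h :: t) ++ [PySem.Chars.lowerChar c] := by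
  simp [pvCap]

-- A's loop, started from a well-formed state, produces the capitalized raw words
theorem pvFoldA (l : List Char) : ∀ (ws : List String) (cur : List Char),
    (fun st : List String × List Char × Bool =>
        if st.2.1.length ≠ 0 then st.1 ++ [String.ofList st.2.1] else st.1)
      (l.foldl pvStepA (ws, pvCap cur, cur.isEmpty))
    = ws ++ (pvV l cur).map (fun w => String.ofList (pvCap w)) := by
  induction l with
  | nil =>
    intro ws cur
    cases cur with
    | nil => simp [pvV, pvCap]
    | cons h t => simp [pvV, pvCap]
  | cons c t ih =>
    intro ws cur
    by_cases ha : PySem.Chars.isalpha c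
    · cases cur with
      | nil =>
        have := ih ws [c]
        simpa [pvStepA, pvV, ha, List.foldl_cons, pvCap] using this
      | cons h hs =>
        have := ih ws ((h :: hs) ++ [c])
        rw [pvCap_append_last] at this
        simpa [pvStepA, pvV, ha, List.foldl_cons, pvCap] using this
    · by_cases hs : (c == ' ' || c == '-' || c == '_') = true
      · cases cur with
        | nil =>
          have := ih ws []
          simpa [pvStepA, pvV, ha, hs, List.foldl_cons, pvCap] using this
        | cons h hs2 =>
          have := ih (ws ++ [String.ofList (pvCap (h :: hs2))]) []
          simp only [pvCap] at this ⊢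
          simpa [pvStepA, pvV, ha, hs, List.foldl_cons, pvCap] using this
      · have := ih ws cur
        simpa [pvStepA, pvV, ha, hs, List.foldl_cons] using this

-- B's cleaned-and-split list is exactly the raw words
theorem pvSplitB (l : List Char) : ∀ (cur : List Char) (acc : List (List Char)),
    PySem.Chars.split₀.go
      ((l.filter (fun c => PySem.Chars.isalpha c || c == ' ' || c == '-' || c == '_')).map
        (fun c => if c == ' ' || c == '-' || c == '_' then ' ' else c))
      cur.reverse acc
    = acc.reverse ++ pvV l cur := by
  induction l with
  | nil =>
    intro cur acc
    cases cur with
    | nil => simp [PySem.Chars.split₀.go, pvV]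
    | cons h t => simp [PySem.Chars.split₀.go, pvV]
  | cons c t ih =>
    intro cur acc
    by_cases ha : PySem.Chars.isalpha c
    · have hns := pvAlpha_not_sep ha
      have hnsp := pvAlpha_not_space ha
      have hne : c ≠ ' ' ∧ c ≠ '-' ∧ c ≠ '_' := by
        simpa [Bool.or_eq_false_iff, and_assoc] using hns
      have := ih (cur ++ [c]) acc
      simpa [List.filter, List.map, ha, hne.1, hne.2.1, hne.2.2, hnsp,
        PySem.Chars.split₀.go, pvV] using this
    · by_cases hs : (c == ' ' || c == '-' || c == '_') = true
      · have hc : c = ' ' ∨ c = '-' ∨ c = '_' := by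
          simpa [or_assoc] using hs
        have hsp : PySem.Chars.isspace ' ' = true := by decide
        cases cur with
        | nil =>
          have := ih [] acc
          rcases hc with rfl | rfl | rfl <;>
            simpa [List.filter, List.map, ha, hsp, PySem.Chars.split₀.go, pvV] using this
        | cons h t2 =>
          have := ih [] ((h :: t2) :: acc)
          rcases hc with rfl | rfl | rfl <;>
            simpa [List.filter, List.map, ha, hsp, PySem.Chars.split₀.go, pvV] using this
      · have hab : PySem.Chars.isalpha c = false := by simpa using ha
        have hsb : (c == ' ' || c == '-' || c == '_') = false := by simpa using hs
        have hne : c ≠ ' ' ∧ c ≠ '-' ∧ c ≠ '_' := by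
          simpa [Bool.or_eq_false_iff, and_assoc] using hsb
        have := ih cur acc
        simpa [List.filter, List.map, hab, hsb, hne.1, hne.2.1, hne.2.2, pvV] using this

theorem pvCapB_ofList (w : List Char) : pvCapB (String.ofList w) = String.ofList (pvCap w) := by
  have hto : PySem.List.slice w none (some 1) = w.take 1 := by
    have := PySem.List.slice_to w (b := 1) (by norm_num)
    simpa using this
  have hfrom : PySem.List.slice w (some 1) none = w.drop 1 := by
    have := PySem.List.slice_from w (a := 1) (by norm_num)
    simpa using this
  have happ : ∀ (a b : List Char),
      String.ofList a ++ String.ofList b = String.ofList (a ++ b) := by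
    intro a b
    apply String.ext
    simp
  cases w with
  | nil =>
    simp [pvCapB, PySem.Str.slice, PySem.Chars.slice, hto, hfrom,
      PySem.Str.upper, PySem.Str.lower, PySem.Chars.upper, PySem.Chars.lower, happ, pvCap]
  | cons h t =>
    simp [pvCapB, PySem.Str.slice, PySem.Chars.slice, hto, hfrom,
      PySem.Str.upper, PySem.Str.lower, PySem.Chars.upper, PySem.Chars.lower, happ, pvCap]

-- ===== VERDICT (by name: the statement is the Claim_ definition above) =====
theorem parse_handwriting_spec : Claim_equal_parse_handwriting := by
  intro s _
  unfold Spec_parse_handwriting parse_handwriting parse_handwriting_alt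
  have hA := pvFoldA s.toList [] []
  rw [show pvCap [] = [] from rfl, show (List.isEmpty ([] : List Char)) = true from rfl] at hA
  simp only [List.nil_append] at hA
  have hB := pvSplitB s.toList [] []
  simp only [List.reverse_nil, List.nil_append] at hB
  simp only [PySem.Str.split₀, PySem.Chars.split₀, String.toList_ofList]
  rw [hB, hA, List.map_map]
  have hmap : (pvV s.toList []).map (pvCapB ∘ String.ofList)
      = (pvV s.toList []).map (fun w => String.ofList (pvCap w)) := by
    apply List.map_congr_left
    intro w _
    exact pvCapB_ofList w
  rw [hmap]
  set r := PySem.Str.join " " ((pvV s.toList []).map (fun w => String.ofList (pvCap w))) with hr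
  by_cases h0 : r = ""
  · simp [h0, PySem.Str.len]
  · have hne : r.toList ≠ [] := by
      intro hc
      apply h0
      rw [← String.toList_inj] at *
      simpa using hc
    simp [PySem.Str.len, h0]
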